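-- pv_equiv track=rewrite | github.com/space-bacon/SignSystems | main.py | simple_categorization
-- ===== SOURCE A (Python) =====
-- sign_systems = {
--     "Biological_Sign_Systems": {
--         "Genetic_Sign_Systems": ["DNA", "RNA", "Protein Synthesis", "Epigenetics"],
--         "Cellular_Sign_Systems": ["Signal Transduction", "Receptor-Ligand Interactions", "Intracellular Communication", "Intercellular Communication"],
--         "Ecological_Sign_Systems": ["Symbiosis", "Pollination", "Seed Dispersal", "Animal Behavior"],
--         "Evolutionary_Sign_Systems": ["Natural Selection", "Coevolution", "Speciation"]
--     },
--     "Human_Sign_Systems": {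
--         "Linguistic_Sign_Systems": ["Phonology", "Morphology", "Syntax", "Semantics", "Pragmatics"],
--         "Nonverbal_Sign_Systems": ["Gestures", "Facial Expressions", "Body Language", "Proxemics"],
--         "Cultural_Sign_Systems": ["Symbols", "Rituals", "Art", "Myths"],
--         "Technological_Sign_Systems": ["Digital Communication", "Internet of Things", "Artificial Intelligence"]
--     },
--     "Animal_Sign_Systems": {
--         "Vocalizations": ["Birds", "Mammals", "Amphibians", "Insects"],
--         "Chemical_Communication": ["Pheromones", "Scent Marking", "Alarm Signals", "Trail Markers"],
--         "Visual_Signals": ["Coloration", "Bioluminescence", "Postures", "Movements"],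
--         "Tactile_Signals": ["Grooming", "Touch", "Vibrations"]
--     },
--     "Artificial_Sign_Systems": {
--         "Formal_Languages": ["Mathematical Symbols", "Programming Languages", "Logical Notation", "Chemical Formulae"],
--         "Road_Signs": ["Regulatory Signs", "Warning Signs", "Informational Signs", "Guide Signs"],
--         "Maritime_Signals": ["Flags", "Lights", "Sound Signals", "Buoys"],
--         "Aviation_Signals": ["Air Traffic Control", "Navigation Lights", "Ground Signals", "In-Flight Signals"]
--     },
--     "Semiotic_Theories": {
--         "Structural_Semiotics": ["Structural Semiotics"],
--         "Peircean_Semiotics": ["Peircean Semiotics"],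
--         "Saussurean_Semiotics": ["Saussurean Semiotics"],
--         "Biosemiotics": ["Biosemiotics"],
--         "Cognitive_Semiotics": ["Cognitive Semiotics"],
--         "Cultural_Semiotics": ["Cultural Semiotics"]
--     }
-- }
--
-- def simple_categorization(keyword):
--     categories = {category: 0 for category in sign_systems}
--     subcategories = {category: {sub: 0 for sub in subs} for category, subs in sign_systems.items()}
--
--     keyword_lower = keyword.lower()
--
--     for category, subcategories_dict in sign_systems.items():
--         for subcategory, terms in subcategories_dict.items():
--             for term in terms:
--                 if term.lower() in keyword_lower:
--                     categories[category] += 1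
--                     subcategories[category][subcategory] += 1
--
--     return categories, subcategories
-- ===== SOURCE B (Python) =====
-- sign_systems = {
--     "Biological_Sign_Systems": {
--         "Genetic_Sign_Systems": ["DNA", "RNA", "Protein Synthesis", "Epigenetics"],
--         "Cellular_Sign_Systems": ["Signal Transduction", "Receptor-Ligand Interactions", "Intracellular Communication", "Intercellular Communication"],
--         "Ecological_Sign_Systems": ["Symbiosis", "Pollination", "Seed Dispersal", "Animal Behavior"],
--         "Evolutionary_Sign_Systems": ["Natural Selection", "Coevolution", "Speciation"]
--     },
--     "Human_Sign_Systems": {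
--         "Linguistic_Sign_Systems": ["Phonology", "Morphology", "Syntax", "Semantics", "Pragmatics"],
--         "Nonverbal_Sign_Systems": ["Gestures", "Facial Expressions", "Body Language", "Proxemics"],
--         "Cultural_Sign_Systems": ["Symbols", "Rituals", "Art", "Myths"],
--         "Technological_Sign_Systems": ["Digital Communication", "Internet of Things", "Artificial Intelligence"]
--     },
--     "Animal_Sign_Systems": {
--         "Vocalizations": ["Birds", "Mammals", "Amphibians", "Insects"],
--         "Chemical_Communication": ["Pheromones", "Scent Marking", "Alarm Signals", "Trail Markers"],
--         "Visual_Signals": ["Coloration", "Bioluminescence", "Postures", "Movements"],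
--         "Tactile_Signals": ["Grooming", "Touch", "Vibrations"]
--     },
--     "Artificial_Sign_Systems": {
--         "Formal_Languages": ["Mathematical Symbols", "Programming Languages", "Logical Notation", "Chemical Formulae"],
--         "Road_Signs": ["Regulatory Signs", "Warning Signs", "Informational Signs", "Guide Signs"],
--         "Maritime_Signals": ["Flags", "Lights", "Sound Signals", "Buoys"],
--         "Aviation_Signals": ["Air Traffic Control", "Navigation Lights", "Ground Signals", "In-Flight Signals"]
--     },
--     "Semiotic_Theories": {
--         "Structural_Semiotics": ["Structural Semiotics"],
--         "Peircean_Semiotics": ["Peircean Semiotics"],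
--         "Saussurean_Semiotics": ["Saussurean Semiotics"],
--         "Biosemiotics": ["Biosemiotics"],
--         "Cognitive_Semiotics": ["Cognitive Semiotics"],
--         "Cultural_Semiotics": ["Cultural Semiotics"]
--     }
-- }
--
-- # Inverted index, built ONCE at module load: each distinct lowered term -> the
-- # (category, subcategory) slots that contain it.  The function then never walks
-- # the nested table to test terms; it walks this flat index instead.
-- _TERM_SLOTS = {}
-- for _cat, _subs in sign_systems.items():
--     for _sub, _terms in _subs.items():
--         for _t in _terms:
--             _TERM_SLOTS.setdefault(_t.lower(), []).append((_cat, _sub))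
--
--
-- def simple_categorization(keyword):
--     kl = keyword.lower()
--     cat_counts = {}
--     sub_counts = {}
--     # single flat pass over the index: only matched terms touch the counters
--     for term, slots in _TERM_SLOTS.items():
--         if term in kl:
--             for cat, sub in slots:
--                 cat_counts[cat] = cat_counts.get(cat, 0) + 1
--                 sub_counts[(cat, sub)] = sub_counts.get((cat, sub), 0) + 1
--     # render the fixed output shape by lookup
--     categories = {cat: cat_counts.get(cat, 0) for cat in sign_systems}
--     subcategories = {cat: {sub: sub_counts.get((cat, sub), 0) for sub in subs}
--                      for cat, subs in sign_systems.items()}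
--     return categories, subcategories
-- ===== Notes on version B (the rewrite author's own statement) =====
-- stated objective: alternative
-- what changed: B replaces A's triple-nested walk of the category tree (incrementing two pre-zeroed counter dicts in lockstep) by an inverted index built once at module load mapping each lowered term to its (category, subcategory) slots; the function does one flat pass over that index, bumps sparse counters only for matched terms, and finally renders the fixed output shape by dictionary lookups.
import Mathlib
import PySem

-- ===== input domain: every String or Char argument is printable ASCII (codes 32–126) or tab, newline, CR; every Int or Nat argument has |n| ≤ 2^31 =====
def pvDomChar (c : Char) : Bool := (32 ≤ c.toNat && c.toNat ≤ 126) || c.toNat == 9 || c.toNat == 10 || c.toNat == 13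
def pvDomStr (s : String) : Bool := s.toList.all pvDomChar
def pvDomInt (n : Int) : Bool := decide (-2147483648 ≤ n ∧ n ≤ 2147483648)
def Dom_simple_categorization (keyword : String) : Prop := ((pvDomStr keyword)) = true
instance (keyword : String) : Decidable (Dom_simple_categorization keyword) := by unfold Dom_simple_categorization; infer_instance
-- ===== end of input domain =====

-- B replaces A's triple-nested walk of the category tree by an inverted index (lowered term →
-- its (category, subcategory) slots) built once, one flat counting pass over it, and a final
-- lookup-rendering of the fixed output shape; same cost, different data structure.

-- the module-level constant sign_systems, shared verbatim by both programs
def signSystems : List (String × List (String × List String)) :=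
  [("Biological_Sign_Systems",
     [("Genetic_Sign_Systems", ["DNA", "RNA", "Protein Synthesis", "Epigenetics"]),
      ("Cellular_Sign_Systems", ["Signal Transduction", "Receptor-Ligand Interactions", "Intracellular Communication", "Intercellular Communication"]),
      ("Ecological_Sign_Systems", ["Symbiosis", "Pollination", "Seed Dispersal", "Animal Behavior"]),
      ("Evolutionary_Sign_Systems", ["Natural Selection", "Coevolution", "Speciation"])]),
   ("Human_Sign_Systems",
     [("Linguistic_Sign_Systems", ["Phonology", "Morphology", "Syntax", "Semantics", "Pragmatics"]),
      ("Nonverbal_Sign_Systems", ["Gestures", "Facial Expressions", "Body Language", "Proxemics"]),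
      ("Cultural_Sign_Systems", ["Symbols", "Rituals", "Art", "Myths"]),
      ("Technological_Sign_Systems", ["Digital Communication", "Internet of Things", "Artificial Intelligence"])]),
   ("Animal_Sign_Systems",
     [("Vocalizations", ["Birds", "Mammals", "Amphibians", "Insects"]),
      ("Chemical_Communication", ["Pheromones", "Scent Marking", "Alarm Signals", "Trail Markers"]),
      ("Visual_Signals", ["Coloration", "Bioluminescence", "Postures", "Movements"]),
      ("Tactile_Signals", ["Grooming", "Touch", "Vibrations"])]),
   ("Artificial_Sign_Systems",
     [("Formal_Languages", ["Mathematical Symbols", "Programming Languages", "Logical Notation", "Chemical Formulae"]),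
      ("Road_Signs", ["Regulatory Signs", "Warning Signs", "Informational Signs", "Guide Signs"]),
      ("Maritime_Signals", ["Flags", "Lights", "Sound Signals", "Buoys"]),
      ("Aviation_Signals", ["Air Traffic Control", "Navigation Lights", "Ground Signals", "In-Flight Signals"])]),
   ("Semiotic_Theories",
     [("Structural_Semiotics", ["Structural Semiotics"]),
      ("Peircean_Semiotics", ["Peircean Semiotics"]),
      ("Saussurean_Semiotics", ["Saussurean Semiotics"]),
      ("Biosemiotics", ["Biosemiotics"]),
      ("Cognitive_Semiotics", ["Cognitive Semiotics"]),
      ("Cultural_Semiotics", ["Cultural Semiotics"])])]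

-- ===== PORT A =====
def simple_categorization (keyword : String) : (List (String × Int)) × (List (String × List (String × Int))) :=
  -- categories = {category: 0 for category in sign_systems}
  let categories : PySem.Dict String Int :=
    signSystems.foldl (fun d q => d.insert q.1 0) PySem.Dict.empty
  -- subcategories = {category: {sub: 0 for sub in subs} for category, subs in sign_systems.items()}
  let subcategories : PySem.Dict String (PySem.Dict String Int) :=
    signSystems.foldl (fun d q => d.insert q.1 (q.2.foldl (fun d2 r => d2.insert r.1 0) PySem.Dict.empty)) PySem.Dict.empty
  let keywordLower := PySem.Str.lower keyword
  -- the triple nested for-loop, incrementing both dicts in place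
  let fin :=
    signSystems.foldl (fun st q =>
      q.2.foldl (fun st r =>
        r.2.foldl (fun st term =>
          if PySem.Str.isIn (PySem.Str.lower term) keywordLower then
            (st.1.modify q.1 0 (· + 1),
             st.2.modify q.1 PySem.Dict.empty (fun d => d.modify r.1 0 (· + 1)))
          else st) st) st) (categories, subcategories)
  (fin.1.items, fin.2.items.map (fun r => (r.1, r.2.items)))

-- ===== PORT B =====
-- module-level inverted index of Source B: _TERM_SLOTS (setdefault(k, []).append = modify k [] (· ++ [slot]))
def termSlots : PySem.Dict String (List (String × String)) :=
  signSystems.foldl (fun d q =>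
    q.2.foldl (fun d r =>
      r.2.foldl (fun d t =>
        d.modify (PySem.Str.lower t) [] (fun l => l ++ [(q.1, r.1)])) d) d) PySem.Dict.empty

def simple_categorization_alt (keyword : String) : (List (String × Int)) × (List (String × List (String × Int))) :=
  let kl := PySem.Str.lower keyword
  -- single flat pass over the index: only matched terms touch the counters
  let counts :=
    termSlots.items.foldl
      (fun (st : PySem.Dict String Int × PySem.Dict (String × String) Int) ts =>
        if PySem.Str.isIn ts.1 kl then
          ts.2.foldl (fun st slot =>
            (st.1.modify slot.1 0 (· + 1), st.2.modify slot 0 (· + 1))) st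
        else st)
      (PySem.Dict.empty, PySem.Dict.empty)
  -- render the fixed output shape by lookup
  let categories := signSystems.map (fun q => (q.1, counts.1.getD q.1 0))
  let subcategories := signSystems.map (fun q =>
    (q.1, q.2.map (fun r => (r.1, counts.2.getD (q.1, r.1) 0))))
  (categories, subcategories)

-- ===== PRECONDITION & SPEC =====
def Spec_simple_categorization (keyword : String) (out : (List (String × Int)) × (List (String × List (String × Int)))) : Prop := out = simple_categorization_alt keyword
instance (keyword : String) (out : (List (String × Int)) × (List (String × List (String × Int)))) : Decidable (Spec_simple_categorization keyword out) := by unfold Spec_simple_categorization; infer_instance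

-- ===== CLAIM (what is proved, stated in full; the proofs are below) =====
def Claim_equal_simple_categorization : Prop := ∀ (keyword : String), Dom_simple_categorization keyword → Spec_simple_categorization keyword (simple_categorization keyword)

-- ===== LEMMAS AND PROOFS =====

-- triples of the nested table
def pvTrip (l : List (String × List (String × List String))) : List (String × String × String) :=
  l.flatMap (fun q => q.2.flatMap (fun r => r.2.map (fun t => (q.1, r.1, t))))

-- F1: flatten the triple nested fold
theorem pvFlatten {σ : Type} (F : σ → String × String × String → σ)
    (l : List (String × List (String × List String))) :
    ∀ a : σ, l.foldl (fun a q => q.2.foldl (fun a r => r.2.foldl (fun a t => F a (q.1, r.1, t)) a) a) a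
      = (pvTrip l).foldl F a := by
  induction l with
  | nil => intro a; rfl
  | cons q l ih =>
    intro a
    simp only [List.foldl_cons, pvTrip, List.flatMap_cons, List.foldl_append] at ih ⊢
    rw [ih]
    congr 1
    induction q.2 generalizing a with
    | nil => rfl
    | cons r rs ih2 =>
      simp only [List.foldl_cons, List.flatMap_cons, List.foldl_append, List.foldl_map]
      exact ih2 _

-- F2: a guarded lockstep pair fold is two independent guarded folds
theorem pvSplit2 {σ₁ σ₂ β : Type} (c : β → Bool) (f : σ₁ → β → σ₁) (g : σ₂ → β → σ₂)
    (ts : List β) (a : σ₁) (b : σ₂) :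
    ts.foldl (fun st x => if c x then (f st.1 x, g st.2 x) else st) (a, b)
      = (ts.foldl (fun s x => if c x then f s x else s) a,
         ts.foldl (fun s x => if c x then g s x else s) b) := by
  rw [show (fun (st : σ₁ × σ₂) (x : β) => if c x then (f st.1 x, g st.2 x) else st)
      = (fun st x => ((fun s x => if c x then f s x else s) st.1 x,
                      (fun s x => if c x then g s x else s) st.2 x))
      from by funext st x; by_cases h : c x <;> simp [h]]
  exact PySem.List.foldl_prod_mk
    (fun s x => if c x then f s x else s) (fun s x => if c x then g s x else s) ts a b

-- K1: keys preserved by a fold of guarded modifies whose keys are already present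
theorem pvKeysPres {ν β : Type} (cond : β → Bool) (key : β → String) (d0 : β → ν) (f : β → ν → ν)
    (ts : List β) :
    ∀ d : PySem.Dict String ν, (∀ x ∈ ts, d.contains (key x) = true) →
      (ts.foldl (fun d x => if cond x then d.modify (key x) (d0 x) (f x) else d) d).keys = d.keys := by
  induction ts with
  | nil => intro d _; rfl
  | cons x ts ih =>
    intro d h
    simp only [List.foldl_cons]
    by_cases hc : cond x
    · have hk : (d.modify (key x) (d0 x) (f x)).keys = d.keys := by
        rw [PySem.Dict.keys_modify, PySem.Dict.keys_insert_of_contains _ _ (h x (by simp))]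
      rw [if_pos hc, ih _ (fun y hy => by
        rw [PySem.Dict.contains_iff_mem_keys] at *
        rw [hk]; exact (PySem.Dict.contains_iff_mem_keys d (key y)).mp (h y (List.mem_cons_of_mem _ hy)))]
      exact hk
    · rw [if_neg hc]
      exact ih _ (fun y hy => h y (List.mem_cons_of_mem _ hy))

-- G1: counting fold characterised through getD (generic key type; used on both sides)
theorem pvGetDCount {κ β : Type} [BEq κ] [LawfulBEq κ] (cond : β → Bool) (key : β → κ) (ts : List β) :
    ∀ (a : PySem.Dict κ Int) (k : κ),
      (ts.foldl (fun a x => if cond x then a.modify (key x) 0 (· + 1) else a) a).getD k 0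
        = a.getD k 0 + ((ts.filter (fun x => key x == k && cond x)).length : Int) := by
  induction ts with
  | nil => intro a k; simp
  | cons x ts ih =>
    intro a k
    simp only [List.foldl_cons, List.filter_cons]
    by_cases hc : cond x
    · by_cases hk : key x = k
      · simp only [hk, beq_self_eq_true, Bool.true_and, hc, if_pos]
        rw [ih]
        rw [show (PySem.Dict.modify a k 0 (· + 1)).getD k 0 = a.getD k 0 + 1 from PySem.Dict.getD_modify_self a k 0 (· + 1)]
        simp only [List.length_cons]
        push_cast; ring
      · have : (key x == k && cond x) = false := by simp [hk]
        simp only [if_pos hc, this, Bool.false_eq_true, ite_false]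
        rw [ih, PySem.Dict.getD_modify_of_ne a 0 (· + 1) (Ne.symm hk)]
    · have : (key x == k && cond x) = false := by simp [hc]
      simp only [if_neg hc, this, Bool.false_eq_true, ite_false]
      exact ih a k

-- G2: the subcategory dict of one category evolves as its own counting fold (A side)
theorem pvSubsGetD (p : String → Bool) (ts : List (String × String × String)) :
    ∀ (s : PySem.Dict String (PySem.Dict String Int)) (c : String),
      (ts.foldl (fun s x => if p x.2.2 then s.modify x.1 PySem.Dict.empty (fun d => d.modify x.2.1 0 (· + 1)) else s) s).getD c PySem.Dict.empty
        = (ts.filter (fun x => x.1 == c)).foldl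
            (fun a x => if p x.2.2 then a.modify x.2.1 0 (· + 1) else a) (s.getD c PySem.Dict.empty) := by
  induction ts with
  | nil => intro s c; rfl
  | cons x ts ih =>
    intro s c
    simp only [List.foldl_cons, List.filter_cons]
    by_cases hk : x.1 = c
    · simp only [hk, beq_self_eq_true, if_pos, List.foldl_cons]
      by_cases hp : p x.2.2
      · rw [if_pos hp, ih, if_pos hp]
        congr 1
        rw [← hk, PySem.Dict.getD_modify_self]
      · rw [if_neg hp, ih, if_neg hp]
    · have : (x.1 == c) = false := by simp [hk]
      rw [this]
      simp only [Bool.false_eq_true, ite_false]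
      by_cases hp : p x.2.2
      · rw [if_pos hp, ih]
        congr 1
        exact PySem.Dict.getD_modify_of_ne s _ _ (fun h => hk h.symm)
      · rw [if_neg hp, ih]

def pvBlock (q : String × List (String × List String)) : List (String × String × String) :=
  q.2.flatMap (fun r => r.2.map (fun t => (q.1, r.1, t)))

theorem pvMemBlock (q : String × List (String × List String)) (x : String × String × String)
    (h : x ∈ pvBlock q) : x.1 = q.1 ∧ x.2.1 ∈ q.2.map (fun r => r.1) := by
  simp only [pvBlock, List.mem_flatMap, List.mem_map] at h
  obtain ⟨r, hr, t, _, rfl⟩ := h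
  exact ⟨rfl, by simp only [List.mem_map]; exact ⟨r, hr, rfl⟩⟩

theorem pvMemTrip (l : List (String × List (String × List String))) (x : String × String × String)
    (h : x ∈ pvTrip l) : x.1 ∈ l.map (fun q => q.1) := by
  simp only [pvTrip, List.mem_flatMap, List.mem_map] at h
  obtain ⟨q, hq, r, hr, t, ht, rfl⟩ := h
  simp only [List.mem_map]
  exact ⟨q, hq, rfl⟩

-- T1: filtering the flattened table by one (unique) category name gives that category's block
theorem pvTripFilter (l : List (String × List (String × List String)))
    (hc : (l.map (fun q => q.1)).Nodup) (q : String × List (String × List String)) (hq : q ∈ l) :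
    (pvTrip l).filter (fun x => x.1 == q.1) = pvBlock q := by
  induction l with
  | nil => cases hq
  | cons q' l ih =>
    simp only [List.map_cons, List.nodup_cons] at hc
    have htrip : pvTrip (q' :: l) = pvBlock q' ++ pvTrip l := by
      simp [pvTrip, pvBlock]
    rw [htrip, List.filter_append]
    rcases List.mem_cons.mp hq with rfl | hq'
    · have h1 : (pvBlock q).filter (fun x => x.1 == q.1) = pvBlock q := by
        rw [List.filter_eq_self]
        intro x hx
        simp [(pvMemBlock q x hx).1]
      have h2 : (pvTrip l).filter (fun x => x.1 == q.1) = [] := by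
        rw [List.filter_eq_nil_iff]
        intro x hx
        have := pvMemTrip l x hx
        simp only [beq_iff_eq]
        intro hcontra
        exact hc.1 (hcontra ▸ this)
      rw [h1, h2, List.append_nil]
    · have h1 : (pvBlock q').filter (fun x => x.1 == q.1) = [] := by
        rw [List.filter_eq_nil_iff]
        intro x hx
        simp only [beq_iff_eq]
        rw [(pvMemBlock q' x hx).1]
        intro hcontra
        exact hc.1 (hcontra ▸ (List.mem_map.mpr ⟨q, hq', rfl⟩))
      rw [h1, ih hc.2 hq', List.nil_append]

-- T2: the matching-term count of a whole block is the sum of its per-subcategory counts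
theorem pvBlockCount (p : String → Bool) (q : String × List (String × List String)) :
    ((pvBlock q).filter (fun x => p x.2.2)).length
      = (q.2.map (fun r => (r.2.filter p).length)).sum := by
  rcases q with ⟨c, subs⟩
  induction subs with
  | nil => rfl
  | cons r rs ih =>
    simp only [pvBlock, List.flatMap_cons, List.filter_append, List.length_append,
      List.map_cons, List.sum_cons] at *
    rw [ih]
    congr 1
    rw [List.filter_map, List.length_map]
    exact congrArg List.length (List.filter_congr (fun t _ => rfl))

-- T3: the per-subcategory count inside a block (subcategory names unique)
theorem pvBlockSubCount (p : String → Bool) (q : String × List (String × List String))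
    (hs : (q.2.map (fun r => r.1)).Nodup) (r0 : String × List String) (hr : r0 ∈ q.2) :
    ((pvBlock q).filter (fun x => x.2.1 == r0.1 && p x.2.2)).length
      = (r0.2.filter p).length := by
  rcases q with ⟨c, subs⟩
  induction subs with
  | nil => cases hr
  | cons r rs ih =>
    simp only [List.map_cons, List.nodup_cons] at hs
    simp only [pvBlock, List.flatMap_cons, List.filter_append, List.length_append] at *
    rcases List.mem_cons.mp hr with rfl | hr'
    · have h1 : ((List.map (fun t => (c, r0.1, t)) r0.2).filter (fun x => x.2.1 == r0.1 && p x.2.2)).length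
          = (r0.2.filter p).length := by
        rw [List.filter_map, List.length_map]
        congr 1
        apply List.filter_congr
        intro t _
        simp
      have h2 : ((rs.flatMap (fun r => r.2.map (fun t => (c, r.1, t)))).filter (fun x => x.2.1 == r0.1 && p x.2.2)).length = 0 := by
        rw [List.length_eq_zero_iff, List.filter_eq_nil_iff]
        intro x hx
        simp only [List.mem_flatMap, List.mem_map] at hx
        obtain ⟨r', hr', t, _, rfl⟩ := hx
        simp only [Bool.and_eq_true, beq_iff_eq, not_and]
        intro hcontra
        exact absurd (hcontra ▸ (List.mem_map.mpr ⟨r', hr', rfl⟩)) hs.1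
      rw [h1, h2]
      omega
    · have h1 : ((List.map (fun t => (c, r.1, t)) r.2).filter (fun x => x.2.1 == r0.1 && p x.2.2)).length = 0 := by
        rw [List.length_eq_zero_iff, List.filter_eq_nil_iff]
        intro x hx
        simp only [List.mem_map] at hx
        obtain ⟨t, _, rfl⟩ := hx
        simp only [Bool.and_eq_true, beq_iff_eq, not_and]
        intro hcontra
        exact absurd (hcontra ▸ (List.mem_map.mpr ⟨r0, hr', rfl⟩)) hs.1
      rw [h1, ih hs.2 hr', Nat.zero_add]

-- items of a dict-comprehension over distinct keys
theorem pvInitItems {ν β : Type} (l : List β) (key : β → String) (v : β → ν)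
    (hc : (l.map key).Nodup) :
    (l.foldl (fun d q => d.insert (key q) (v q)) PySem.Dict.empty).items = l.map (fun q => (key q, v q)) := by
  have := PySem.Dict.items_foldl_insert_fresh l key v PySem.Dict.empty
    (fun a _ => PySem.Dict.contains_empty (key a)) hc
  simpa using this

-- the categories dict after A's (flattened) counting loop
theorem pvCatsItems (p : String → Bool) (l : List (String × List (String × List String)))
    (hc : (l.map (fun q => q.1)).Nodup) :
    ((pvTrip l).foldl (fun a x => if p x.2.2 then a.modify x.1 0 (· + 1) else a)
        (l.foldl (fun d q => d.insert q.1 (0 : Int)) PySem.Dict.empty)).items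
      = l.map (fun q => (q.1, ((q.2.map (fun r => ((r.2.filter p).length : Int))).sum))) := by
  set c0 := l.foldl (fun d q => d.insert q.1 (0 : Int)) PySem.Dict.empty with hc0
  have hitems : c0.items = l.map (fun q => (q.1, (0 : Int))) := pvInitItems l (fun q => q.1) (fun _ => 0) hc
  have hkeys0 : c0.keys = l.map (fun q => q.1) := by
    show c0.items.map (fun x => x.1) = _
    rw [hitems, List.map_map]
    rfl
  have hcont : ∀ x ∈ pvTrip l, c0.contains x.1 = true := by
    intro x hx
    rw [PySem.Dict.contains_iff_mem_keys, hkeys0]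
    exact pvMemTrip l x hx
  have hkeys : ((pvTrip l).foldl (fun a x => if p x.2.2 then a.modify x.1 0 (· + 1) else a) c0).keys = c0.keys :=
    pvKeysPres (fun x => p x.2.2) (fun x => x.1) (fun _ => 0) (fun _ => (· + 1)) (pvTrip l) c0 hcont
  have hnd : ((pvTrip l).foldl (fun a x => if p x.2.2 then a.modify x.1 0 (· + 1) else a) c0).keys.Nodup := by
    rw [hkeys, hkeys0]; exact hc
  rw [PySem.Dict.items_eq_map_keys _ hnd 0, hkeys, hkeys0, List.map_map]
  apply List.map_congr_left
  intro q hq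
  simp only [Function.comp_apply]
  have hgd := pvGetDCount (fun x => p x.2.2) (fun x => x.1) (pvTrip l) c0 q.1
  rw [hgd]
  have h0 : c0.getD q.1 0 = 0 := by
    apply PySem.Dict.getD_of_mem_items c0 (v := 0)
    · rw [hitems]; exact List.mem_map.mpr ⟨q, hq, rfl⟩
    · rw [hkeys0]; exact hc
  rw [h0, zero_add]
  have hfilter : (pvTrip l).filter (fun x => x.1 == q.1 && p x.2.2)
      = (pvBlock q).filter (fun x => p x.2.2) := by
    rw [← pvTripFilter l hc q hq, List.filter_filter]
    apply List.filter_congr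
    intro x _
    exact Bool.and_comm _ _
  rw [hfilter, pvBlockCount p q]
  congr 1
  rw [Nat.cast_list_sum, List.map_map]
  rfl

-- the subcategories dict after A's (flattened) counting loop
theorem pvSubsItems (p : String → Bool) (l : List (String × List (String × List String)))
    (hc : (l.map (fun q => q.1)).Nodup) (hs : ∀ q ∈ l, (q.2.map (fun r => r.1)).Nodup) :
    (((pvTrip l).foldl (fun s x => if p x.2.2 then s.modify x.1 PySem.Dict.empty (fun d => d.modify x.2.1 0 (· + 1)) else s)
        (l.foldl (fun d q => d.insert q.1 (q.2.foldl (fun d2 r => d2.insert r.1 (0 : Int)) PySem.Dict.empty)) PySem.Dict.empty)).items).map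
          (fun r => (r.1, r.2.items))
      = l.map (fun q => (q.1, q.2.map (fun r => (r.1, ((r.2.filter p).length : Int))))) := by
  set inner : (String × List (String × List String)) → PySem.Dict String Int :=
    fun q => q.2.foldl (fun d2 r => d2.insert r.1 (0 : Int)) PySem.Dict.empty with hinner
  set s0 := l.foldl (fun d q => d.insert q.1 (inner q)) PySem.Dict.empty with hs0
  have hitems : s0.items = l.map (fun q => (q.1, inner q)) := pvInitItems l (fun q => q.1) inner hc
  have hkeys0 : s0.keys = l.map (fun q => q.1) := by
    show s0.items.map (fun x => x.1) = _
    rw [hitems, List.map_map]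
    rfl
  have hcont : ∀ x ∈ pvTrip l, s0.contains x.1 = true := by
    intro x hx
    rw [PySem.Dict.contains_iff_mem_keys, hkeys0]
    exact pvMemTrip l x hx
  set F := fun (s : PySem.Dict String (PySem.Dict String Int)) (x : String × String × String) =>
      if p x.2.2 then s.modify x.1 PySem.Dict.empty (fun d => d.modify x.2.1 0 (· + 1)) else s with hF
  have hkeys : ((pvTrip l).foldl F s0).keys = s0.keys :=
    pvKeysPres (fun x => p x.2.2) (fun x => x.1) (fun _ => PySem.Dict.empty)
      (fun x => fun d => d.modify x.2.1 0 (· + 1)) (pvTrip l) s0 hcont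
  have hnd : ((pvTrip l).foldl F s0).keys.Nodup := by
    rw [hkeys, hkeys0]; exact hc
  rw [PySem.Dict.items_eq_map_keys _ hnd PySem.Dict.empty, hkeys, hkeys0, List.map_map, List.map_map]
  apply List.map_congr_left
  intro q hq
  simp only [Function.comp_apply]
  have hgd : ((pvTrip l).foldl F s0).getD q.1 PySem.Dict.empty
      = (pvBlock q).foldl (fun a x => if p x.2.2 then a.modify x.2.1 0 (· + 1) else a) (inner q) := by
    rw [hF]
    rw [pvSubsGetD p (pvTrip l) s0 q.1, pvTripFilter l hc q hq]
    congr 1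
    apply PySem.Dict.getD_of_mem_items s0 (v := inner q)
    · rw [hitems]; exact List.mem_map.mpr ⟨q, hq, rfl⟩
    · rw [hkeys0]; exact hc
  rw [hgd]
  have hiitems : (inner q).items = q.2.map (fun r => (r.1, (0 : Int))) :=
    pvInitItems q.2 (fun r => r.1) (fun _ => 0) (hs q hq)
  have hikeys0 : (inner q).keys = q.2.map (fun r => r.1) := by
    show (inner q).items.map (fun x => x.1) = _
    rw [hiitems, List.map_map]
    rfl
  have hicont : ∀ x ∈ pvBlock q, (inner q).contains x.2.1 = true := by
    intro x hx
    rw [PySem.Dict.contains_iff_mem_keys, hikeys0]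
    exact (pvMemBlock q x hx).2
  have hikeys : ((pvBlock q).foldl (fun a x => if p x.2.2 then a.modify x.2.1 0 (· + 1) else a) (inner q)).keys = (inner q).keys :=
    pvKeysPres (fun x => p x.2.2) (fun x => x.2.1) (fun _ => 0) (fun _ => (· + 1)) (pvBlock q) (inner q) hicont
  have hind : ((pvBlock q).foldl (fun a x => if p x.2.2 then a.modify x.2.1 0 (· + 1) else a) (inner q)).keys.Nodup := by
    rw [hikeys, hikeys0]; exact hs q hq
  rw [PySem.Dict.items_eq_map_keys _ hind 0, hikeys, hikeys0, List.map_map]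
  congr 1
  apply List.map_congr_left
  intro r0 hr0
  simp only [Function.comp_apply]
  rw [pvGetDCount (fun x => p x.2.2) (fun x => x.2.1) (pvBlock q) (inner q) r0.1]
  have h0 : (inner q).getD r0.1 0 = 0 := by
    apply PySem.Dict.getD_of_mem_items (inner q) (v := 0)
    · rw [hiitems]; exact List.mem_map.mpr ⟨r0, hr0, rfl⟩
    · rw [hikeys0]; exact hs q hq
  rw [h0, zero_add, pvBlockSubCount p q (hs q hq) r0 hr0]

-- ===== B-side machinery: the index build is a grouping fold over the flattened pairs =====

-- the flattened (lowered term, (category, subcategory)) pairs of the fixed table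
def pvPairs : List (String × (String × String)) :=
  (pvTrip signSystems).map (fun x => (PySem.Str.lower x.2.2, (x.1, x.2.1)))

theorem pvFoldlFlatMap {α β σ : Type} (f : α → List β) (g : σ → β → σ) (l : List α) :
    ∀ a : σ, (l.flatMap f).foldl g a = l.foldl (fun a x => (f x).foldl g a) a := by
  induction l with
  | nil => intro a; rfl
  | cons x l ih => intro a; simp only [List.flatMap_cons, List.foldl_append, List.foldl_cons, ih]

theorem pvFilterFlatMap {α β : Type} (f : α → List β) (q : β → Bool) (l : List α) :
    l.flatMap (fun x => (f x).filter q) = (l.flatMap f).filter q := by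
  induction l with
  | nil => rfl
  | cons x l ih => simp only [List.flatMap_cons, List.filter_append, ih]

theorem pvFlatMapCongr {α β : Type} {f g : α → List β} (l : List α) (h : ∀ x ∈ l, f x = g x) :
    l.flatMap f = l.flatMap g := by
  induction l with
  | nil => rfl
  | cons x l ih =>
    simp only [List.flatMap_cons]
    rw [h x (by simp), ih (fun y hy => h y (List.mem_cons_of_mem _ hy))]

-- distinct keys flatMapped over their groups give back the list, up to permutation
theorem pvGroupPerm {β : Type} (K : List String) :
    ∀ L : List (String × β), K.Nodup → (∀ p ∈ L, p.1 ∈ K) →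
      (K.flatMap (fun kk => L.filter (fun p => p.1 == kk))).Perm L := by
  induction K with
  | nil =>
    intro L _ hcov
    have : L = [] := by
      cases L with
      | nil => rfl
      | cons p l => exact absurd (hcov p (by simp)) (by simp)
    simp [this]
  | cons k K ih =>
    intro L hnd hcov
    rw [List.nodup_cons] at hnd
    simp only [List.flatMap_cons]
    have hsub : ∀ kk ∈ K, L.filter (fun p => p.1 == kk)
        = (L.filter (fun p => !(p.1 == k))).filter (fun p => p.1 == kk) := by
      intro kk hkk
      rw [List.filter_filter]
      apply List.filter_congr
      intro p _
      by_cases hpk : p.1 = kk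
      · have hkkk : kk ≠ k := fun h => hnd.1 (h ▸ hkk)
        simp [hpk, hkkk]
      · simp [hpk]
    rw [pvFlatMapCongr K hsub]
    have hcov2 : ∀ p ∈ L.filter (fun p => !(p.1 == k)), p.1 ∈ K := by
      intro p hp
      have h1 := List.mem_filter.mp hp
      have h2 := hcov p h1.1
      rcases List.mem_cons.mp h2 with h | h
      · exfalso; simp [h] at h1
      · exact h
    have hperm2 := ih (L.filter (fun p => !(p.1 == k))) hnd.2 hcov2
    refine List.Perm.trans ?_ (List.filter_append_perm (fun p => p.1 == k) L)
    exact List.Perm.append_left _ hperm2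

-- unguarded keyed counting fold, through getD
theorem pvGetDCountPlain {κ2 β : Type} [BEq κ2] [LawfulBEq κ2] (key : β → κ2) (ts : List β) :
    ∀ (a : PySem.Dict κ2 Int) (k : κ2),
      (ts.foldl (fun a x => PySem.Dict.modify a (key x) 0 (· + 1)) a).getD k 0
        = a.getD k 0 + ((ts.filter (fun x => key x == k)).length : Int) := by
  induction ts with
  | nil => intro a k; simp
  | cons x ts ih =>
    intro a k
    simp only [List.foldl_cons, List.filter_cons]
    by_cases hk : key x = k
    · simp only [hk, beq_self_eq_true, if_pos]
      rw [ih]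
      rw [show (PySem.Dict.modify a k 0 (· + 1)).getD k 0 = a.getD k 0 + 1 from PySem.Dict.getD_modify_self a k 0 (· + 1)]
      simp only [List.length_cons]
      push_cast; ring
    · have hb : (key x == k) = false := by simp [hk]
      simp only [hb, Bool.false_eq_true, ite_false]
      rw [ih, PySem.Dict.getD_modify_of_ne a 0 (· + 1) (Ne.symm hk)]

-- getD of the guarded per-group counting fold, through the original pair list
theorem pvIndexCount {β κ2 : Type} [BEq κ2] [LawfulBEq κ2] (c : String → Bool)
    (key : String × β → κ2) (L : List (String × β)) (K : List String)
    (hnd : K.Nodup) (hcov : ∀ p ∈ L, p.1 ∈ K) (k : κ2) :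
    (K.foldl (fun a kk => if c kk then (L.filter (fun p => p.1 == kk)).foldl
        (fun a p => PySem.Dict.modify a (key p) 0 (· + 1)) a else a) PySem.Dict.empty).getD k 0
      = ((L.filter (fun p => key p == k && c p.1)).length : Int) := by
  have hstep : (fun (a : PySem.Dict κ2 Int) kk => if c kk then (L.filter (fun p => p.1 == kk)).foldl
        (fun a p => PySem.Dict.modify a (key p) 0 (· + 1)) a else a)
      = (fun a kk => ((if c kk then L.filter (fun p => p.1 == kk) else []).foldl
        (fun a p => PySem.Dict.modify a (key p) 0 (· + 1)) a)) := by
    funext a kk; by_cases h : c kk <;> simp [h]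
  rw [hstep, ← pvFoldlFlatMap]
  have hcount := pvGetDCountPlain key
      (K.flatMap (fun kk => if c kk then L.filter (fun p => p.1 == kk) else [])) PySem.Dict.empty k
  rw [hcount, PySem.Dict.getD_empty, zero_add]
  congr 1
  have hgrp : ∀ kk ∈ K, (if c kk then L.filter (fun p => p.1 == kk) else [])
      = (L.filter (fun p => p.1 == kk)).filter (fun p => c p.1) := by
    intro kk _
    by_cases h : c kk
    · rw [if_pos h, eq_comm, List.filter_eq_self]
      intro p hp
      have := (List.mem_filter.mp hp).2
      simp only [beq_iff_eq] at this
      rw [this]; exact h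
    · rw [if_neg h, eq_comm, List.filter_eq_nil_iff]
      intro p hp
      have := (List.mem_filter.mp hp).2
      simp only [beq_iff_eq] at this
      rw [this]; simp [h]
  have hperm : (K.flatMap (fun kk => if c kk then L.filter (fun p => p.1 == kk) else [])).Perm
      (L.filter (fun p => c p.1)) := by
    rw [pvFlatMapCongr K hgrp, pvFilterFlatMap]
    exact (pvGroupPerm K L hnd hcov).filter _
  rw [(hperm.filter (fun p => key p == k)).length_eq, List.filter_filter]

-- termSlots is the grouping fold over pvPairs
theorem pvBuild : termSlots = pvPairs.foldl (fun d p => d.modify p.1 [] (fun l => l ++ [p.2])) PySem.Dict.empty := by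
  have h := pvFlatten (fun (d : PySem.Dict String (List (String × String))) (x : String × String × String) =>
      d.modify (PySem.Str.lower x.2.2) [] (fun l => l ++ [(x.1, x.2.1)])) signSystems PySem.Dict.empty
  refine Eq.trans ?_ (h.trans ?_)
  · rfl
  · rw [pvPairs, List.foldl_map]

theorem pvKeysSpec : termSlots.keys = PySem.Set.ofList (pvPairs.map (fun p => p.1)) := by
  rw [pvBuild, PySem.Dict.keys_foldl_modify_key]
  simp [PySem.Set.update, PySem.Set.ofList_eq_foldl]

theorem pvKeysNodup : termSlots.keys.Nodup := by
  rw [pvKeysSpec]; exact PySem.Set.nodup_ofList _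

theorem pvKeysCover : ∀ p ∈ pvPairs, p.1 ∈ termSlots.keys := by
  intro p hp
  rw [pvKeysSpec]
  exact (PySem.Set.mem_ofList _ _).mpr (List.mem_map_of_mem hp)

theorem pvGetDSlots : ∀ kk, termSlots.getD kk [] = (pvPairs.filter (fun p => p.1 == kk)).map (fun p => p.2) := by
  intro kk
  rw [pvBuild, PySem.Dict.getD_foldl_modify_append]
  simp

theorem pvItemsSpec : termSlots.items = termSlots.keys.map (fun kk => (kk, termSlots.getD kk [])) :=
  PySem.Dict.items_eq_map_keys _ pvKeysNodup []

-- ===== VERDICT (by name: the statement is the Claim_ definition above) =====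

set_option maxRecDepth 10000 in
set_option maxHeartbeats 1000000 in
theorem simple_categorization_spec : Claim_equal_simple_categorization := by
  intro keyword _
  show simple_categorization keyword = simple_categorization_alt keyword
  set kl := PySem.Str.lower keyword with hkl
  set p := fun term => PySem.Str.isIn (PySem.Str.lower term) kl with hp
  -- canonical form both sides reach
  set canon : (List (String × Int)) × (List (String × List (String × Int))) :=
    (signSystems.map (fun q => (q.1, ((q.2.map (fun r => ((r.2.filter p).length : Int))).sum))),
     signSystems.map (fun q => (q.1, q.2.map (fun r => (r.1, ((r.2.filter p).length : Int)))))) with hcanon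
  -- A = canon
  have hA : simple_categorization keyword = canon := by
    have h1 := pvFlatten (fun st (x : String × String × String) =>
          if p x.2.2 then
            (st.1.modify x.1 0 (· + 1),
             st.2.modify x.1 PySem.Dict.empty (fun d => d.modify x.2.1 0 (· + 1)))
          else st) signSystems
        ((signSystems.foldl (fun d q => d.insert q.1 (0 : Int)) PySem.Dict.empty,
          signSystems.foldl (fun d q => d.insert q.1 (q.2.foldl (fun d2 r => d2.insert r.1 (0 : Int)) PySem.Dict.empty)) PySem.Dict.empty))
    have h2 := pvSplit2 (fun x : String × String × String => p x.2.2)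
        (fun a x => a.modify x.1 0 (· + 1))
        (fun a x => a.modify x.1 PySem.Dict.empty (fun d => d.modify x.2.1 0 (· + 1)))
        (pvTrip signSystems)
        (signSystems.foldl (fun d q => d.insert q.1 (0 : Int)) PySem.Dict.empty)
        (signSystems.foldl (fun d q => d.insert q.1 (q.2.foldl (fun d2 r => d2.insert r.1 (0 : Int)) PySem.Dict.empty)) PySem.Dict.empty)
    have h3 := h1.trans h2
    have hAc := congrArg (fun z : PySem.Dict String Int × PySem.Dict String (PySem.Dict String Int) =>
        (z.1.items, z.2.items.map (fun r => (r.1, r.2.items)))) h3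
    refine Eq.trans ?_ (Eq.trans hAc ?_)
    · rfl
    · dsimp only
      rw [pvCatsItems p signSystems (by decide), pvSubsItems p signSystems (by decide) (by decide)]
  -- B = canon
  have hB : simple_categorization_alt keyword = canon := by
    simp only [simple_categorization_alt]
    rw [← hkl]
    -- the flat pass over the index, rewritten through the grouping view of termSlots
    have hstep : (fun (st : PySem.Dict String Int × PySem.Dict (String × String) Int)
                      (kk : String) =>
          if PySem.Str.isIn kk kl then (termSlots.getD kk []).foldl
            (fun st slot => (st.1.modify slot.1 0 (· + 1), st.2.modify slot 0 (· + 1))) st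
          else st)
        = (fun st kk =>
            (if PySem.Str.isIn kk kl then (pvPairs.filter (fun p => p.1 == kk)).foldl
               (fun a p => PySem.Dict.modify a p.2.1 0 (· + 1)) st.1 else st.1,
             if PySem.Str.isIn kk kl then (pvPairs.filter (fun p => p.1 == kk)).foldl
               (fun a p => PySem.Dict.modify a p.2 0 (· + 1)) st.2 else st.2)) := by
      funext st kk
      rcases st with ⟨s1, s2⟩
      rw [pvGetDSlots kk, List.foldl_map]
      rw [PySem.List.foldl_prod_mk
        (f := fun a (p : String × (String × String)) => PySem.Dict.modify a p.2.1 0 (· + 1))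
        (g := fun a (p : String × (String × String)) => PySem.Dict.modify a p.2 0 (· + 1))]
      split_ifs <;> rfl
    have hfold :
        termSlots.items.foldl
            (fun (st : PySem.Dict String Int × PySem.Dict (String × String) Int) ts =>
              if PySem.Str.isIn ts.1 kl then
                ts.2.foldl (fun st slot =>
                  (st.1.modify slot.1 0 (· + 1), st.2.modify slot 0 (· + 1))) st
              else st)
            (PySem.Dict.empty, PySem.Dict.empty)
          = (termSlots.keys.foldl (fun a kk => if PySem.Str.isIn kk kl then
               (pvPairs.filter (fun p => p.1 == kk)).foldl (fun a p => PySem.Dict.modify a p.2.1 0 (· + 1)) a else a) PySem.Dict.empty,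
             termSlots.keys.foldl (fun a kk => if PySem.Str.isIn kk kl then
               (pvPairs.filter (fun p => p.1 == kk)).foldl (fun a p => PySem.Dict.modify a p.2 0 (· + 1)) a else a) PySem.Dict.empty) := by
      rw [pvItemsSpec, List.foldl_map]
      have hpm := PySem.List.foldl_prod_mk
          (f := fun (a : PySem.Dict String Int) (kk : String) => if PySem.Str.isIn kk kl then (pvPairs.filter (fun p => p.1 == kk)).foldl (fun a p => PySem.Dict.modify a p.2.1 0 (· + 1)) a else a)
          (g := fun (a : PySem.Dict (String × String) Int) (kk : String) => if PySem.Str.isIn kk kl then (pvPairs.filter (fun p => p.1 == kk)).foldl (fun a p => PySem.Dict.modify a p.2 0 (· + 1)) a else a)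
          termSlots.keys PySem.Dict.empty PySem.Dict.empty
      have hcm := PySem.List.foldl_congr_mem (l := termSlots.keys)
          (f := fun (x : PySem.Dict String Int × PySem.Dict (String × String) Int) (y : String) =>
            if PySem.Str.isIn (y, termSlots.getD y []).1 kl = true then
              List.foldl (fun st slot => (st.1.modify slot.1 0 (· + 1), st.2.modify slot 0 (· + 1))) x
                (y, termSlots.getD y []).2
            else x)
          (g := fun st kk =>
            ((fun (a : PySem.Dict String Int) (kk : String) => if PySem.Str.isIn kk kl then (pvPairs.filter (fun p => p.1 == kk)).foldl (fun a p => PySem.Dict.modify a p.2.1 0 (· + 1)) a else a) st.1 kk,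
             (fun (a : PySem.Dict (String × String) Int) (kk : String) => if PySem.Str.isIn kk kl then (pvPairs.filter (fun p => p.1 == kk)).foldl (fun a p => PySem.Dict.modify a p.2 0 (· + 1)) a else a) st.2 kk))
          (init := (PySem.Dict.empty, PySem.Dict.empty))
          (fun acc kk _ => congrFun (congrFun hstep acc) kk)
      exact hcm.trans hpm
    simp only [hfold, hcanon, Prod.mk.injEq]
    constructor
    -- categories component
    · apply List.map_congr_left
      intro q hq
      have h1 := pvIndexCount (fun kk => PySem.Str.isIn kk kl) (fun p : String × (String × String) => p.2.1)
        pvPairs termSlots.keys pvKeysNodup pvKeysCover q.1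
      rw [h1]
      have hmap : pvPairs.filter (fun pp => pp.2.1 == q.1 && PySem.Str.isIn pp.1 kl)
          = ((pvTrip signSystems).filter (fun x => x.1 == q.1 && p x.2.2)).map
              (fun x => (PySem.Str.lower x.2.2, (x.1, x.2.1))) := by
        rw [pvPairs, List.filter_map]
        rfl
      rw [hmap, List.length_map]
      have hfilter : (pvTrip signSystems).filter (fun x => x.1 == q.1 && p x.2.2)
          = (pvBlock q).filter (fun x => p x.2.2) := by
        rw [← pvTripFilter signSystems (by decide) q hq, List.filter_filter]
        apply List.filter_congr
        intro x _
        exact Bool.and_comm _ _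
      rw [hfilter, pvBlockCount p q]
      congr 1
      rw [Nat.cast_list_sum, List.map_map]
      rfl
    -- subcategories component
    · apply List.map_congr_left
      intro q hq
      congr 1
      apply List.map_congr_left
      intro r0 hr0
      have h1 := pvIndexCount (fun kk => PySem.Str.isIn kk kl) (fun p : String × (String × String) => p.2)
        pvPairs termSlots.keys pvKeysNodup pvKeysCover (q.1, r0.1)
      rw [h1]
      have hmap : pvPairs.filter (fun pp => pp.2 == (q.1, r0.1) && PySem.Str.isIn pp.1 kl)
          = ((pvTrip signSystems).filter (fun x => (x.1, x.2.1) == (q.1, r0.1) && p x.2.2)).map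
              (fun x => (PySem.Str.lower x.2.2, (x.1, x.2.1))) := by
        rw [pvPairs, List.filter_map]
        rfl
      rw [hmap, List.length_map]
      have hfilter : (pvTrip signSystems).filter (fun x => (x.1, x.2.1) == (q.1, r0.1) && p x.2.2)
          = (pvBlock q).filter (fun x => x.2.1 == r0.1 && p x.2.2) := by
        rw [← pvTripFilter signSystems (by decide) q hq, List.filter_filter]
        apply List.filter_congr
        intro x _
        show ((x.1 == q.1 && x.2.1 == r0.1) && p x.2.2) = ((x.2.1 == r0.1 && p x.2.2) && x.1 == q.1)
        rw [Bool.and_assoc, Bool.and_comm]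
      rw [hfilter]
      have hsubnd : (q.2.map (fun r => r.1)).Nodup := by
        have : ∀ q ∈ signSystems, ((q.2.map (fun r => r.1)).Nodup) := by decide
        exact this q hq
      rw [pvBlockSubCount p q hsubnd r0 hr0]
  rw [hA, hB]
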